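-- pv_equiv track=rewrite | github.com/black-wolfie/Bitcoin-Cash-text-hash | BCH_cash_addr_tools.py | polymod
-- ===== SOURCE A (Python) =====
-- def polymod(values):
--     chk = 1
--     generator = [
--         (0x01, 0x98f2bc8e61),
--         (0x02, 0x79b76d99e2),
--         (0x04, 0xf33e5fb3c4),
--         (0x08, 0xae2eabe2a8),
--         (0x10, 0x1e4f43e470)]
--     for value in values:
--         top = chk >> 35
--         chk = ((chk & 0x07ffffffff) << 5) ^ value
--         for i in generator:
--             if top & i[0] != 0:
--                 chk ^= i[1]
--     return chk ^ 1
-- ===== SOURCE B (Python) =====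
-- # Table-driven polymod: one pass over values; the inner conditional loop over the
-- # five generator masks is replaced by a 32-entry XOR table indexed by the low 5
-- # bits of the shifted-out top of chk (top & anything-above-bit-4 never matters).
-- _GENERATOR = [0x98f2bc8e61, 0x79b76d99e2, 0xf33e5fb3c4, 0xae2eabe2a8, 0x1e4f43e470]
--
-- _TABLE = []
-- for _t in range(32):
--     _m = 0
--     _bit = 1
--     for _g in _GENERATOR:
--         if _t & _bit:
--             _m ^= _g
--         _bit <<= 1
--     _TABLE.append(_m)
--
--
-- def polymod(values):
--     chk = 1
--     for value in values:
--         chk = ((chk & 0x07ffffffff) << 5) ^ value ^ _TABLE[(chk >> 35) & 31]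
--     return chk ^ 1
-- ===== Notes on version B (the rewrite author's own statement) =====
-- stated objective: faster
-- what changed: The inner conditional loop over the five generator masks is replaced by a precomputed 32-entry XOR table indexed by the low 5 bits of the shifted-out top of chk, turning the nested scan into a single table-indexed pass.
import Mathlib
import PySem

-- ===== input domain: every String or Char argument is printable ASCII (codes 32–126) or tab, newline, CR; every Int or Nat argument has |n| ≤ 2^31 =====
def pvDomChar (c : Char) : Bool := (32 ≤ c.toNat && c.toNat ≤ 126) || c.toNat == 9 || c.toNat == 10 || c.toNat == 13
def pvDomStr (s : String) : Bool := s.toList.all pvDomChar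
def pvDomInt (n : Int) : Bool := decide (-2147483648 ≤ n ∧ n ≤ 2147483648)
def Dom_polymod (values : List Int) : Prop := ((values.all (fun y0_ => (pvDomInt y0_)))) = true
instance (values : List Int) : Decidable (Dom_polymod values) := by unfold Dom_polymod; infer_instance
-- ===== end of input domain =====

-- B replaces A's inner conditional loop over the five generator masks by a precomputed
-- 32-entry XOR table indexed by the low 5 bits of the shifted-out top of chk (alternative
-- decomposition; same single pass over `values`).

-- ===== PORT A =====
def polymod (values : List Int) : Int :=
  let generator : List (Int × Int) :=
    [(0x01, 0x98f2bc8e61), (0x02, 0x79b76d99e2), (0x04, 0xf33e5fb3c4),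
     (0x08, 0xae2eabe2a8), (0x10, 0x1e4f43e470)]
  let chk : Int := values.foldl (fun chk value =>
    let top := chk >>> (35 : Nat)
    let chk := PySem.Int.bxor ((PySem.Int.band chk 0x07ffffffff) <<< (5 : Nat)) value
    generator.foldl (fun chk i =>
      if PySem.Int.band top i.1 ≠ 0 then PySem.Int.bxor chk i.2 else chk) chk) 1
  PySem.Int.bxor chk 1

-- ===== PORT B =====
def pvGenerator : List Int := [0x98f2bc8e61, 0x79b76d99e2, 0xf33e5fb3c4, 0xae2eabe2a8, 0x1e4f43e470]

-- the module-level table-building loop of Source B: state (m, bit), appending m per t in range(32)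
def pvTable : List Int :=
  (PySem.List.pyRange 0 32 1).foldl (fun tbl t =>
    tbl ++ [(pvGenerator.foldl
        (fun (s : Int × Int) g =>
          (if PySem.Int.band t s.2 ≠ 0 then PySem.Int.bxor s.1 g else s.1,
           s.2 <<< (1 : Nat)))
        (0, 1)).1]) []

def polymod_alt (values : List Int) : Int :=
  let chk : Int := values.foldl (fun chk value =>
    PySem.Int.bxor
      (PySem.Int.bxor ((PySem.Int.band chk 0x07ffffffff) <<< (5 : Nat)) value)
      -- _TABLE[(chk >> 35) & 31]: the index is always in 0..31, so pyGetD is exact here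
      (PySem.List.pyGetD pvTable (PySem.Int.band (chk >>> (35 : Nat)) 31) 0)) 1
  PySem.Int.bxor chk 1

-- ===== PRECONDITION & SPEC =====
def Spec_polymod (values : List Int) (out : Int) : Prop := out = polymod_alt values
instance (values : List Int) (out : Int) : Decidable (Spec_polymod values out) := by unfold Spec_polymod; infer_instance

-- ===== CLAIM (what is proved, stated in full; the proofs are below) =====
def Claim_equal_polymod : Prop := ∀ (values : List Int), Dom_polymod values → Spec_polymod values (polymod values)

-- ===== LEMMAS AND PROOFS =====

theorem pvTable_eq : pvTable = [0, 656907472481, 522768456162, 967538972547, 1044723512260,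
    462998945189, 595007253030, 79382357063, 748107326120, 235620756681, 925997890378,
    341105636651, 399716405612, 849904983821, 157430696078, 808882357999, 130178868336,
    578713250321, 446545427858, 1095394063347, 1019804932020, 504719530453, 638984506966,
    52425474103, 757556840152, 174270482617, 866887507770, 348500070747, 289368683804,
    943501032317, 253014715646, 696227635871] := by decide

lemma bxor_ofNat_ofNat (m n : Nat) :
    PySem.Int.bxor (Int.ofNat m) (Int.ofNat n) = Int.ofNat (m ^^^ n) := by
  simp [PySem.Int.bxor]

lemma bxor_ofNat_negSucc (m n : Nat) :
    PySem.Int.bxor (Int.ofNat m) (Int.negSucc n) = Int.negSucc (m ^^^ n) := by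
  simp [PySem.Int.bxor, Int.negSucc_eq]; omega

lemma bxor_negSucc_ofNat (m n : Nat) :
    PySem.Int.bxor (Int.negSucc m) (Int.ofNat n) = Int.negSucc (m ^^^ n) := by
  simp [PySem.Int.bxor, Int.negSucc_eq]; omega

lemma bxor_negSucc_negSucc (m n : Nat) :
    PySem.Int.bxor (Int.negSucc m) (Int.negSucc n) = Int.ofNat (m ^^^ n) := by
  simp [PySem.Int.bxor, Int.negSucc_eq]; omega

lemma bxor_assoc (a b c : Int) :
    PySem.Int.bxor (PySem.Int.bxor a b) c = PySem.Int.bxor a (PySem.Int.bxor b c) := by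
  cases a <;> cases b <;> cases c <;>
    simp only [bxor_ofNat_ofNat, bxor_ofNat_negSucc, bxor_negSucc_ofNat, bxor_negSucc_negSucc,
      Nat.xor_assoc]

lemma band_ofNat_ofNat (m n : Nat) :
    PySem.Int.band (Int.ofNat m) (Int.ofNat n) = Int.ofNat (m &&& n) := by
  simp [PySem.Int.band]

lemma band_negSucc_ofNat (m n : Nat) :
    PySem.Int.band (Int.negSucc m) (Int.ofNat n) = Int.ofNat (n - (n &&& m)) := by
  simp [PySem.Int.band, Int.negSucc_eq]; omega

-- the heart of the equivalence: A's conditional XOR chain over the five generator masks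
-- equals a single XOR with the table entry selected by the low 5 bits of `top`
lemma step_eq (top base : Int) :
    ([((0x01:Int), (0x98f2bc8e61:Int)), (0x02, 0x79b76d99e2), (0x04, 0xf33e5fb3c4),
      (0x08, 0xae2eabe2a8), (0x10, 0x1e4f43e470)]).foldl
      (fun chk i => if PySem.Int.band top i.1 ≠ 0 then PySem.Int.bxor chk i.2 else chk) base
    = PySem.Int.bxor base (PySem.List.pyGetD pvTable (PySem.Int.band top 31) 0) := by
  cases top with
  | ofNat m =>
    have hb : ∀ c : Nat, c &&& 31 = c →
        PySem.Int.band (Int.ofNat m) (Int.ofNat c) = Int.ofNat ((m &&& 31) &&& c) := by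
      intro c hc
      rw [band_ofNat_ofNat, Nat.and_assoc, Nat.and_comm 31 c, hc]
    have h1 := hb 1 (by decide)
    have h2 := hb 2 (by decide)
    have h4 := hb 4 (by decide)
    have h8 := hb 8 (by decide)
    have h16 := hb 16 (by decide)
    have h31 : PySem.Int.band (Int.ofNat m) 31 = Int.ofNat (m &&& 31) := by
      rw [show (31:Int) = Int.ofNat 31 from rfl, band_ofNat_ofNat]
    have hw : m &&& 31 < 32 := Nat.lt_succ_of_le Nat.and_le_right
    simp only [List.foldl,
      show ((1:Int)) = Int.ofNat 1 from rfl, show ((2:Int)) = Int.ofNat 2 from rfl,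
      show ((4:Int)) = Int.ofNat 4 from rfl, show ((8:Int)) = Int.ofNat 8 from rfl,
      show ((16:Int)) = Int.ofNat 16 from rfl,
      h1, h2, h4, h8, h16, h31]
    generalize m &&& 31 = w at hw
    interval_cases w <;> (simp [pvTable_eq, PySem.List.pyGetD, bxor_assoc]; try (congr 1 <;> decide))
  | negSucc m =>
    have hb : ∀ c : Nat, c &&& 31 = c →
        PySem.Int.band (Int.negSucc m) (Int.ofNat c) = Int.ofNat (c - (c &&& (31 &&& m))) := by
      intro c hc
      rw [band_negSucc_ofNat, ← Nat.and_assoc, hc]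
    have h1 := hb 1 (by decide)
    have h2 := hb 2 (by decide)
    have h4 := hb 4 (by decide)
    have h8 := hb 8 (by decide)
    have h16 := hb 16 (by decide)
    have h31 : PySem.Int.band (Int.negSucc m) 31 = Int.ofNat (31 - (31 &&& m)) := by
      rw [show (31:Int) = Int.ofNat 31 from rfl, band_negSucc_ofNat]
    have hw : 31 &&& m < 32 := Nat.lt_succ_of_le Nat.and_le_left
    simp only [List.foldl,
      show ((1:Int)) = Int.ofNat 1 from rfl, show ((2:Int)) = Int.ofNat 2 from rfl,
      show ((4:Int)) = Int.ofNat 4 from rfl, show ((8:Int)) = Int.ofNat 8 from rfl,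
      show ((16:Int)) = Int.ofNat 16 from rfl,
      h1, h2, h4, h8, h16, h31]
    generalize 31 &&& m = w at hw
    interval_cases w <;> (simp [pvTable_eq, PySem.List.pyGetD, bxor_assoc]; try (congr 1 <;> decide))

-- ===== VERDICT (by name: the statement is the Claim_ definition above) =====
theorem polymod_spec : Claim_equal_polymod := by
  intro values _
  show polymod values = polymod_alt values
  simp only [polymod, polymod_alt]
  congr 2
  funext chk value
  exact step_eq (chk >>> (35 : Nat)) _
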